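-- pv_equiv track=rewrite | github.com/Jung-jieun/Coding-Test | 프로그래머스/1/159994. 카드 뭉치/카드 뭉치.py | solution
-- ===== SOURCE A (Python) =====
-- def solution(cards1, cards2, goal):
--     answer = 'Yes'
--     # goal 요소와 cards1, cards2랑 비교하기
--     for i in goal:
--         if cards1 and cards1[0]==i: # cards1이 비어있지 않아야 함!
--             del cards1[0] # 한 번 사용한 카드는 다시 사용 불가
--         elif cards2 and cards2[0]==i:
--             del cards2[0]
--         else:
--             return 'No'
--     return answer
-- ===== SOURCE B (Python) =====
-- from functools import reduce
--
-- def solution(cards1, cards2, goal):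
--     # Fold over goal with an Option-style state: (i, j) read pointers into the
--     # unmodified decks, or None once matching has failed. No mutation of the arguments.
--     def step(st, g):
--         if st is None:
--             return None
--         i, j = st
--         if i < len(cards1) and cards1[i] == g:
--             return (i + 1, j)
--         if j < len(cards2) and cards2[j] == g:
--             return (i, j + 1)
--         return None
--     return 'No' if reduce(step, goal, (0, 0)) is None else 'Yes'
-- ===== Notes on version B (the rewrite author's own statement) =====
-- stated objective: alternative
-- what changed: B replaces A's early-return loop with destructive del cards[0] by a pure reduce over goal carrying an optional pair of read pointers into the unmodified decks, so no list is ever shifted or mutated.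
import Mathlib
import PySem

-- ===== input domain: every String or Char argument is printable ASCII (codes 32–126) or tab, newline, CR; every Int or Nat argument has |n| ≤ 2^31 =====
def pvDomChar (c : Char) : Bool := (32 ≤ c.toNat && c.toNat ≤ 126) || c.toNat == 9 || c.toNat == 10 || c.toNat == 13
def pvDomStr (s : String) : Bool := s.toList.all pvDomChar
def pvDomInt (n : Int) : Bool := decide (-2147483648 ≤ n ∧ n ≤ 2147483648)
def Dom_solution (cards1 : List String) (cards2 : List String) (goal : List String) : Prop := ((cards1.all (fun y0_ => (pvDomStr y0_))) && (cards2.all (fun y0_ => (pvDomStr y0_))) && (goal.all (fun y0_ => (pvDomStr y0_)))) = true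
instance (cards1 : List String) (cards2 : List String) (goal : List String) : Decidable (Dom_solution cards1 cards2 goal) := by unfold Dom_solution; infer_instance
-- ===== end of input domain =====

-- ===== PORT A =====
-- B folds over goal with an optional pair of read pointers instead of A's early-return
-- loop with destructive `del cards[0]`. A mutates its argument lists in place; this
-- equivalence is about the RETURN value only — B does not mutate.
-- A: for i in goal: if cards1 and cards1[0]==i: del cards1[0] elif ... else: return 'No'
def pvLoopA : List String → List String → List String → String
  | _, _, [] => "Yes"
  | c1, c2, g :: gs =>
    if c1.head? = some g then pvLoopA c1.tail c2 gs
    else if c2.head? = some g then pvLoopA c1 c2.tail gs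
    else "No"

def solution (cards1 : List String) (cards2 : List String) (goal : List String) : String :=
  pvLoopA cards1 cards2 goal

-- ===== PORT B =====
-- reduce(step, goal, (0,0)) with state Option (Nat × Nat); `i < len(cards1) and
-- cards1[i] == g` is exactly `cards1[i]? = some g`
def pvStepB (c1 c2 : List String) (st : Option (Nat × Nat)) (g : String) : Option (Nat × Nat) :=
  match st with
  | none => none
  | some (i, j) =>
    if c1[i]? = some g then some (i + 1, j)
    else if c2[j]? = some g then some (i, j + 1)
    else none

def solution_alt (cards1 : List String) (cards2 : List String) (goal : List String) : String :=
  if (goal.foldl (pvStepB cards1 cards2) (some (0, 0))).isNone then "No" else "Yes"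

-- ===== PRECONDITION & SPEC =====
def Spec_solution (cards1 : List String) (cards2 : List String) (goal : List String) (out : String) : Prop := out = solution_alt cards1 cards2 goal
instance (cards1 : List String) (cards2 : List String) (goal : List String) (out : String) : Decidable (Spec_solution cards1 cards2 goal out) := by unfold Spec_solution; infer_instance

-- ===== CLAIM (what is proved, stated in full; the proofs are below) =====
def Claim_equal_solution : Prop := ∀ (cards1 : List String) (cards2 : List String) (goal : List String), Dom_solution cards1 cards2 goal → Spec_solution cards1 cards2 goal (solution cards1 cards2 goal)

-- ===== LEMMAS AND PROOFS =====
theorem foldl_none (c1 c2 : List String) (gs : List String) :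
    gs.foldl (pvStepB c1 c2) none = none := by
  induction gs with
  | nil => rfl
  | cons g gs ih => simpa [pvStepB] using ih

theorem loopA_eq_fold (c1 c2 : List String) (gs : List String) :
    ∀ i j, pvLoopA (c1.drop i) (c2.drop j) gs
      = (if (gs.foldl (pvStepB c1 c2) (some (i, j))).isNone then "No" else "Yes") := by
  induction gs with
  | nil => intro i j; rfl
  | cons g gs ih =>
    intro i j
    simp only [pvLoopA, List.head?_drop, List.tail_drop, List.foldl_cons, pvStepB]
    by_cases h1 : c1[i]? = some g
    · simp [h1, ih]
    · by_cases h2 : c2[j]? = some g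
      · simp [h1, h2, ih]
      · simp [h1, h2, foldl_none]

-- ===== VERDICT (by name: the statement is the Claim_ definition above) =====
theorem solution_spec : Claim_equal_solution := by
  intro c1 c2 g _
  unfold Spec_solution solution solution_alt
  simpa using loopA_eq_fold c1 c2 g 0 0
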